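-- pv_equiv track=rewrite | github.com/joshuamchavez2/python-exercises | example.py | number_as_start
-- ===== SOURCE A (Python) =====
-- def number_as_start(input_value):
--     cleaned_string = ""
--
--     for index, value in enumerate(input_value):
--         if value not in "123456790":
--             for i in range(index, len(input_value)):
--                 cleaned_string += input_value[i]
--             break
--
--
--     return cleaned_string
-- ===== SOURCE B (Python) =====
-- def number_as_start(input_value):
--     return input_value.lstrip("123456790")
-- ===== Notes on version B (the rewrite author's own statement) =====
-- stated objective: faster
-- what changed: Replaces the nested index loops (scan for first non-member, then rebuild the tail character by character with += concatenation) with a single str.lstrip call on the same character set.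
import Mathlib
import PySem

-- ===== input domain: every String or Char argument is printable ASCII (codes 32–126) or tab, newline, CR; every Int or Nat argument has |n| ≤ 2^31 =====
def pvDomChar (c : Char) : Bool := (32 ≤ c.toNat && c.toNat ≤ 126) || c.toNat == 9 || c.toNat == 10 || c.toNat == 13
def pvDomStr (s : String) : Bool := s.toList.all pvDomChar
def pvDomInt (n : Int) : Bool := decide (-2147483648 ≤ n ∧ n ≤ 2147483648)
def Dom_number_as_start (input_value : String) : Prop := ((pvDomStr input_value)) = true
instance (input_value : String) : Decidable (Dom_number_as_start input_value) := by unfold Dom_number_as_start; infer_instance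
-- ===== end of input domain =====

-- B replaces A's nested index loops with a single lstrip("123456790") call (idiomatic; same values).


-- ===== PORT A =====
-- outer loop over enumerate(input_value); on the first value not in "123456790",
-- the inner loop appends input_value[i] for i in range(index, len(input_value)) and breaks
def numberAsStartGo (cs : List Char) : List (Int × Char) → String
  | [] => ""
  | (index, value) :: rest =>
      if ("123456790".toList.contains value) then numberAsStartGo cs rest
      else
        String.mk ((PySem.List.pyRange index (PySem.List.len cs) 1).foldl
          (fun acc j => acc ++ [PySem.List.pyGetD cs j ' ']) [])

def number_as_start (input_value : String) : String :=
  numberAsStartGo input_value.toList (PySem.List.enumerate input_value.toList 0)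

-- ===== PORT B =====
-- hand port of str.lstrip("123456790"): drop the leading run of characters in the set (exact)
def number_as_start_alt (input_value : String) : String :=
  String.mk (input_value.toList.dropWhile (fun c => "123456790".toList.contains c))

-- ===== PRECONDITION & SPEC =====
def Spec_number_as_start (input_value : String) (out : String) : Prop := out = number_as_start_alt input_value
instance (input_value : String) (out : String) : Decidable (Spec_number_as_start input_value out) := by unfold Spec_number_as_start; infer_instance

-- ===== CLAIM (what is proved, stated in full; the proofs are below) =====
def Claim_equal_number_as_start : Prop := ∀ (input_value : String), Dom_number_as_start input_value → Spec_number_as_start input_value (number_as_start input_value)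

-- ===== LEMMAS AND PROOFS =====
lemma numberAsStartGo_eq (full : List Char) :
    ∀ (cs : List Char) (s : Nat), full.drop s = cs →
      numberAsStartGo full (PySem.List.enumerate cs (s : Int)) =
        String.mk (cs.dropWhile (fun c => "123456790".toList.contains c)) := by
  intro cs
  induction cs with
  | nil => intro s _; rfl
  | cons c t ih =>
    intro s hdrop
    rw [PySem.List.enumerate_cons, numberAsStartGo]
    by_cases hmem : ("123456790".toList.contains c) = true
    · rw [if_pos hmem, List.dropWhile_cons_of_pos hmem]
      have h1 : full.drop (s + 1) = t := by
        have := congrArg (List.drop 1) hdrop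
        simpa [List.drop_drop, Nat.add_comm] using this
      have := ih (s + 1) h1
      push_cast at this
      exact this
    · rw [if_neg hmem, List.dropWhile_cons_of_neg hmem]
      have hfold := PySem.List.foldl_pyRange_pyGetD (xs := full) (d := ' ')
        (f := fun acc x => acc ++ [x]) (init := ([] : List Char)) (a := (s : Int))
        (by positivity)
      have hsimp : ∀ (l : List Char), l.foldl (fun acc x => acc ++ [x]) [] = l := by
        intro l
        have h : ∀ acc, l.foldl (fun acc x => acc ++ [x]) acc = acc ++ l := by
          induction l with
          | nil => simp
          | cons a l ihl => intro acc; simp [ihl]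
        simpa using h []
      simp only [hfold, Int.toNat_natCast, hsimp]
      rw [hdrop]

-- ===== VERDICT (by name: the statement is the Claim_ definition above) =====
theorem number_as_start_spec : Claim_equal_number_as_start := by
  intro input_value _
  unfold Spec_number_as_start number_as_start number_as_start_alt
  have := numberAsStartGo_eq input_value.toList input_value.toList 0 (by simp)
  simpa using this
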